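-- pv_equiv track=rewrite | github.com/aryankeluskar/DSA-Practice-Repo | HKD-April/jumble.py | word_jumble
-- ===== SOURCE A (Python) =====
-- def word_jumble(Word, Jumble):
--     # Write your code here
--     jumarr = list(Jumble)
--     for i in Word:
--         if i in jumarr:
--             jumarr.remove(i)
--         else:
--             return 'N'
--
--     return 'Y'
-- ===== SOURCE B (Python) =====
-- from collections import Counter
--
-- def word_jumble(Word, Jumble):
--     cw = Counter(Word)
--     cj = Counter(Jumble)
--     return 'Y' if all(n <= cj[c] for c, n in cw.items()) else 'N'
-- ===== Notes on version B (the rewrite author's own statement) =====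
-- stated objective: faster
-- what changed: Replaced the per-character membership-and-remove scan over a mutable copy of Jumble by building two Counter frequency tables once and comparing them in bulk.
import Mathlib
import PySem

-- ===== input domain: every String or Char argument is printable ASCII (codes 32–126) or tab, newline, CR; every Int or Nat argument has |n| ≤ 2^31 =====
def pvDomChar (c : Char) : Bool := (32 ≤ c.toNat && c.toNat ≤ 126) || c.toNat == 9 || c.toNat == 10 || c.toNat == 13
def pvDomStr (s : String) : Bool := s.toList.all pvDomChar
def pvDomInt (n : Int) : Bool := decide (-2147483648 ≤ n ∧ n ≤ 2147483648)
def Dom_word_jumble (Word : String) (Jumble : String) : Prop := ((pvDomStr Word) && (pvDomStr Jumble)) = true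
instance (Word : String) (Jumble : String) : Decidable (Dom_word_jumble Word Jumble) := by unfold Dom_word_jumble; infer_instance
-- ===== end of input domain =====

-- B replaces A's per-character membership-and-remove scan by two frequency tables (Counter)
-- compared in bulk, replacing the quadratic scan (objective: faster, measured).

-- ===== PORT A =====
-- the for-loop over Word with the mutable jumarr: 'if i in jumarr: jumarr.remove(i) else: return N'
def wjLoopA : List Char → List Char → String
  | [], _ => "Y"
  | i :: rest, jumarr =>
      match PySem.List.remove? jumarr i with   -- none ↔ i ∉ jumarr (the 'in' test); some = the removed list
      | some jumarr' => wjLoopA rest jumarr'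
      | none => "N"

def word_jumble (Word : String) (Jumble : String) : String :=
  wjLoopA Word.toList Jumble.toList

-- ===== PORT B =====
def word_jumble_alt (Word : String) (Jumble : String) : String :=
  let cw := PySem.Dict.counter Word.toList
  let cj := PySem.Dict.counter Jumble.toList
  if cw.items.all (fun p => decide (p.2 ≤ cj.getD p.1 0)) then "Y" else "N"

-- ===== PRECONDITION & SPEC =====
def Spec_word_jumble (Word : String) (Jumble : String) (out : String) : Prop := out = word_jumble_alt Word Jumble
instance (Word : String) (Jumble : String) (out : String) : Decidable (Spec_word_jumble Word Jumble out) := by unfold Spec_word_jumble; infer_instance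

-- ===== CLAIM (what is proved, stated in full; the proofs are below) =====
def Claim_equal_word_jumble : Prop := ∀ (Word : String) (Jumble : String), Dom_word_jumble Word Jumble → Spec_word_jumble Word Jumble (word_jumble Word Jumble)

-- ===== LEMMAS AND PROOFS =====

theorem wjLoopA_YN (w j : List Char) : wjLoopA w j = "Y" ∨ wjLoopA w j = "N" := by
  induction w generalizing j with
  | nil => left; rfl
  | cons i rest ih =>
      simp only [wjLoopA]
      cases h : PySem.List.remove? j i with
      | none => right; rfl
      | some j' => exact ih j'

theorem wjLoopA_eq_Y (w j : List Char) :
    wjLoopA w j = "Y" ↔ ∀ c, w.count c ≤ j.count c := by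
  induction w generalizing j with
  | nil => simp [wjLoopA]
  | cons i rest ih =>
      simp only [wjLoopA]
      cases h : PySem.List.remove? j i with
      | none =>
          have hmem : i ∉ j := (PySem.List.remove?_eq_none_iff j i).mp h
          have h2 : j.count i = 0 := List.count_eq_zero.mpr hmem
          show ("N" : String) = "Y" ↔ _
          constructor
          · intro hc; exact absurd hc (by decide)
          · intro hall
            have h1 := hall i
            simp [List.count_cons_self, h2] at h1
      | some j' =>
          have hmem : i ∈ j := by
            by_contra hn
            rw [(PySem.List.remove?_eq_none_iff j i).mpr hn] at h
            cases h
          have herase : j' = j.erase i := by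
            rw [PySem.List.remove?_eq_some_erase (xs := j) (v := i) hmem] at h
            exact (Option.some.injEq _ _).mp h.symm
          subst herase
          show wjLoopA rest (j.erase i) = "Y" ↔ _
          rw [ih]
          have hji : 1 ≤ j.count i := List.one_le_count_iff.mpr hmem
          constructor
          · intro hall c
            have hc := hall c
            simp only [List.count_cons, List.count_erase] at hc ⊢
            by_cases hci : c = i
            · subst hci; simp at hc ⊢; omega
            · simp [Ne.symm hci] at hc ⊢; omega
          · intro hall c
            have hc := hall c
            simp only [List.count_cons, List.count_erase] at hc ⊢
            by_cases hci : c = i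
            · subst hci; simp at hc ⊢; omega
            · simp [Ne.symm hci] at hc ⊢; omega

theorem alt_eq_Y (w j : List Char) :
    ((PySem.Dict.counter w).items.all
        (fun p => decide (p.2 ≤ (PySem.Dict.counter j).getD p.1 0)) = true)
      ↔ ∀ c, w.count c ≤ j.count c := by
  rw [PySem.Dict.items_counter]
  simp only [List.all_map, List.all_eq_true, Function.comp, decide_eq_true_eq,
    PySem.Dict.getD_counter, PySem.Set.mem_ofList]
  constructor
  · intro hall c
    by_cases hc : c ∈ w
    · have := hall c hc
      exact_mod_cast this
    · simp [List.count_eq_zero.mpr hc]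
  · intro hall k _
    exact_mod_cast hall k

-- ===== VERDICT (by name: the statement is the Claim_ definition above) =====
theorem word_jumble_spec : Claim_equal_word_jumble := by
  intro Word Jumble _
  unfold Spec_word_jumble word_jumble word_jumble_alt
  by_cases hP : ∀ c, Word.toList.count c ≤ Jumble.toList.count c
  · rw [(wjLoopA_eq_Y _ _).mpr hP]
    simp only [if_pos ((alt_eq_Y _ _).mpr hP)]
  · have hA : wjLoopA Word.toList Jumble.toList = "N" := by
      rcases wjLoopA_YN Word.toList Jumble.toList with h | h
      · exact absurd ((wjLoopA_eq_Y _ _).mp h) hP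
      · exact h
    rw [hA]
    simp only [if_neg (fun hb => hP ((alt_eq_Y _ _).mp hb))]
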